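-- pv_equiv track=rewrite | github.com/SkellieJohn/spacy-italian-api | main.py | detect_prefixes
-- ===== SOURCE A (Python) =====
-- PREFIXES = {
--     "in": "negation", "im": "negation", "il": "negation", "ir": "negation",
--     "dis": "negation/reversal", "s": "negation/removal",
--     "ri": "repetition", "re": "repetition",
--     "pre": "before", "post": "after",
--     "sotto": "under", "sopra": "above", "sovra": "above",
--     "anti": "against", "contro": "against",
--     "co": "together", "con": "together",
--     "stra": "intensive", "arci": "intensive",
--     "auto": "self", "multi": "many", "uni": "one",
--     "inter": "between", "trans": "across", "extra": "beyond",
--     "super": "above/excessive", "ultra": "beyond",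
--     "bi": "two", "tri": "three",
-- }
--
-- def detect_prefixes(word: str, lemma: str) -> list[dict]:
--     """Detect prefixes by comparing word to lemma and known patterns."""
--     prefixes = []
--     word_lower = word.lower()
--
--     # Sort by length (longest first) to match longer prefixes first
--     sorted_prefixes = sorted(PREFIXES.items(), key=lambda x: len(x[0]), reverse=True)
--
--     for prefix, meaning in sorted_prefixes:
--         if word_lower.startswith(prefix) and len(word_lower) > len(prefix) + 2:
--             # Check if the remaining part could be a root
--             remainder = word_lower[len(prefix):]
--             # Avoid matching if lemma also starts with this prefix (it's part of the root)
--             if not lemma.lower().startswith(prefix) or len(prefixes) == 0: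
--                 prefixes.append({"prefix": f"{prefix}-", "meaning": meaning})
--                 break  # Usually one prefix in Italian
--
--     return prefixes
-- ===== SOURCE B (Python) =====
-- PREFIXES = {
--     "in": "negation", "im": "negation", "il": "negation", "ir": "negation",
--     "dis": "negation/reversal", "s": "negation/removal",
--     "ri": "repetition", "re": "repetition",
--     "pre": "before", "post": "after",
--     "sotto": "under", "sopra": "above", "sovra": "above",
--     "anti": "against", "contro": "against",
--     "co": "together", "con": "together",
--     "stra": "intensive", "arci": "intensive",
--     "auto": "self", "multi": "many", "uni": "one",
--     "inter": "between", "trans": "across", "extra": "beyond",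
--     "super": "above/excessive", "ultra": "beyond",
--     "bi": "two", "tri": "three",
-- }
--
-- _MAX_PREFIX_LEN = max(map(len, PREFIXES))
--
--
-- def detect_prefixes(word: str, lemma: str) -> list[dict]:
--     """Longest-prefix lookup: try the word's own leading substrings, longest first.
--
--     The lemma argument is kept for the signature but never consulted: in the
--     original scan the lemma test is always disabled because the accumulator is
--     empty at every check, so the result never depends on it.
--     """
--     word_lower = word.lower()
--     for n in range(min(len(word_lower) - 3, _MAX_PREFIX_LEN), 0, -1):
--         cand = word_lower[:n]
--         if cand in PREFIXES:
--             return [{"prefix": cand + "-", "meaning": PREFIXES[cand]}]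
--     return []
-- ===== Notes on version B (the rewrite author's own statement) =====
-- stated objective: simpler
-- what changed: Instead of sorting the 29-entry prefix table by length and scanning it with startswith (plus a lemma check that is dead code because the accumulator is always empty at the check), B tries the word's own leading substrings, from min(len(word)-3, max key length) down to 1, with one dict lookup per length and returns the first hit; the per-call sort, the table scan and the use of the lemma argument disappear.
import Mathlib
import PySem

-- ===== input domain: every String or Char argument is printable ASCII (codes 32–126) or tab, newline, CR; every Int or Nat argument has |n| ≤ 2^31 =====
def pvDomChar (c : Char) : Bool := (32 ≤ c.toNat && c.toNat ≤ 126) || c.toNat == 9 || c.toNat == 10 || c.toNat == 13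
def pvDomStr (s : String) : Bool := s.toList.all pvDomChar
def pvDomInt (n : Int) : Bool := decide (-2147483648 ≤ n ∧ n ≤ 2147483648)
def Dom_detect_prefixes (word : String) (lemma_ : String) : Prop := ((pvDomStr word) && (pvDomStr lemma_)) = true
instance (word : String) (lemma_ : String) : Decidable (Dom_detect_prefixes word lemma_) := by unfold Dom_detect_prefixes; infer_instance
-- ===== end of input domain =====

-- B replaces the sort-the-table-then-startswith scan (whose lemma test is dead code) by
-- trying the word's own leading substrings, longest first, with one dict lookup each (objective: simpler).

-- ===== PORT A =====
-- the module-level PREFIXES dict, in insertion order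
def pvPrefixPairs : List (String × String) :=
  [("in", "negation"), ("im", "negation"), ("il", "negation"), ("ir", "negation"),
   ("dis", "negation/reversal"), ("s", "negation/removal"),
   ("ri", "repetition"), ("re", "repetition"),
   ("pre", "before"), ("post", "after"),
   ("sotto", "under"), ("sopra", "above"), ("sovra", "above"),
   ("anti", "against"), ("contro", "against"),
   ("co", "together"), ("con", "together"),
   ("stra", "intensive"), ("arci", "intensive"),
   ("auto", "self"), ("multi", "many"), ("uni", "one"),
   ("inter", "between"), ("trans", "across"), ("extra", "beyond"),
   ("super", "above/excessive"), ("ultra", "beyond"),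
   ("bi", "two"), ("tri", "three")]

def pvPREFIXES : PySem.Dict String String := PySem.Dict.ofList pvPrefixPairs

-- the 'for prefix, meaning in sorted_prefixes: … break' loop, with the accumulator `prefixes`
def pvDetectLoop (word_lower : String) (lemma_ : String)
    (prefixes : List (List (String × String))) :
    List (String × String) → List (List (String × String))
  | [] => prefixes
  | (prefix_, meaning) :: rest =>
    if PySem.Str.startswith word_lower prefix_ &&
        decide (PySem.Str.len word_lower > PySem.Str.len prefix_ + 2) then
      let _remainder := PySem.Str.slice word_lower (some (PySem.Str.len prefix_)) none
      if !(PySem.Str.startswith (PySem.Str.lower lemma_) prefix_) || (prefixes.length == 0) then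
        prefixes ++ [[("prefix", prefix_ ++ "-"), ("meaning", meaning)]]  -- append, then break
      else pvDetectLoop word_lower lemma_ prefixes rest
    else pvDetectLoop word_lower lemma_ prefixes rest

def detect_prefixes (word : String) (lemma_ : String) : List (List (String × String)) :=
  let word_lower := PySem.Str.lower word
  let sorted_prefixes := PySem.List.sorted pvPREFIXES.items (fun x => PySem.Str.len x.1) true
  pvDetectLoop word_lower lemma_ [] sorted_prefixes

-- ===== PORT B =====
-- max(map(len, PREFIXES)); max() of this nonempty list is always some, the getD default is unreachable
def pvMaxPrefixLen : Int :=
  (PySem.List.max? ((PySem.Dict.keys pvPREFIXES).map PySem.Str.len) (fun x => x)).getD 0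

-- 'for n in range(min(len(word_lower) - 3, _MAX_PREFIX_LEN), 0, -1): …'
def pvPrefixScan (word_lower : String) : List Int → List (List (String × String))
  | [] => []
  | n :: rest =>
    let cand := PySem.Str.slice word_lower none (some n)
    match pvPREFIXES.get? cand with
    | some meaning => [[("prefix", cand ++ "-"), ("meaning", meaning)]]
    | none => pvPrefixScan word_lower rest

def detect_prefixes_alt (word : String) (lemma_ : String) : List (List (String × String)) :=
  let word_lower := PySem.Str.lower word
  pvPrefixScan word_lower (PySem.List.pyRange (min (PySem.Str.len word_lower - 3) pvMaxPrefixLen) 0 (-1))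

-- ===== PRECONDITION & SPEC =====
def Spec_detect_prefixes (word : String) (lemma_ : String) (out : List (List (String × String))) : Prop := out = detect_prefixes_alt word lemma_
instance (word : String) (lemma_ : String) (out : List (List (String × String))) : Decidable (Spec_detect_prefixes word lemma_ out) := by unfold Spec_detect_prefixes; infer_instance

-- ===== CLAIM (what is proved, stated in full; the proofs are below) =====
def Claim_equal_detect_prefixes : Prop := ∀ (word : String) (lemma_ : String), Dom_detect_prefixes word lemma_ → Spec_detect_prefixes word lemma_ (detect_prefixes word lemma_)

-- ===== LEMMAS AND PROOFS =====

-- A's per-item test, with the word as the only relevant input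
def pvQA (wl : String) (pm : String × String) : Bool :=
  PySem.Str.startswith wl pm.1 && decide (PySem.Str.len wl > PySem.Str.len pm.1 + 2)

-- the same test in take/length form
def pvQC (wl : String) (pm : String × String) : Bool :=
  decide (wl.toList.take pm.1.toList.length = pm.1.toList ∧ pm.1.toList.length + 3 ≤ wl.toList.length)

-- shape of a result entry
def pvOut : Option (String × String) → List (List (String × String))
  | none => []
  | some (p, m) => [[("prefix", p ++ "-"), ("meaning", m)]]

-- the length-L group of the table, in insertion (= stable-sorted) order
def pvG : Nat → List (String × String)
  | 1 => [("s", "negation/removal")]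
  | 2 => [("in", "negation"), ("im", "negation"), ("il", "negation"), ("ir", "negation"),
          ("ri", "repetition"), ("re", "repetition"), ("co", "together"), ("bi", "two")]
  | 3 => [("dis", "negation/reversal"), ("pre", "before"), ("con", "together"),
          ("uni", "one"), ("tri", "three")]
  | 4 => [("post", "after"), ("anti", "against"), ("stra", "intensive"),
          ("arci", "intensive"), ("auto", "self")]
  | 5 => [("sotto", "under"), ("sopra", "above"), ("sovra", "above"), ("multi", "many"),
          ("inter", "between"), ("trans", "across"), ("extra", "beyond"),
          ("super", "above/excessive"), ("ultra", "beyond")]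
  | 6 => [("contro", "against")]
  | _ => []

-- groups of length ≤ m, longest first
def pvT : Nat → List (String × String)
  | 0 => []
  | (k+1) => pvG (k+1) ++ pvT k

lemma pvMaxPrefixLen_eq : pvMaxPrefixLen = 6 := by decide

lemma pvSorted_eq :
    PySem.List.sorted pvPREFIXES.items (fun x => PySem.Str.len x.1) true = pvT 6 := by
  decide

lemma pvFilter_eq : ∀ k < 7,
    pvPrefixPairs.filter (fun pm => pm.1.toList.length == k) = pvG k := by
  decide

lemma pvG_len : ∀ k < 7, ∀ pm ∈ pvG k, pm.1.toList.length = k := by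
  decide

-- generic: find? over a list = find? over its filtration, if the predicate implies the filter
lemma pvFind?_filter {α : Type} (l : List α) (p q : α → Bool)
    (h : ∀ x ∈ l, p x = true → q x = true) :
    l.find? p = (l.filter q).find? p := by
  induction l with
  | nil => rfl
  | cons a t ih =>
    by_cases hp : p a = true
    · simp [hp, h a (by simp) hp]
    · have hp' : p a = false := by simpa using hp
      by_cases hq : q a = true <;>
        simp [hp', hq, ih (fun x hx => h x (by simp [hx]))]

lemma pvFind?_congr_mem {α : Type} (l : List α) (p q : α → Bool)
    (h : ∀ x ∈ l, p x = q x) :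
    l.find? p = l.find? q := by
  induction l with
  | nil => rfl
  | cons a t ih =>
    have ha := h a (by simp)
    by_cases hp : p a = true <;>
      simp_all [ih (fun x hx => h x (by simp [hx]))]

-- Dict.get? on a literal dict is first-match lookup in its pair list
lemma pvGet?_eq_find? (l : List (String × String)) (x : String) :
    (PySem.Dict.mk l).get? x = (l.find? (fun pm => pm.1 == x)).map (·.2) := by
  induction l with
  | nil => rfl
  | cons a t ih =>
    obtain ⟨k, v⟩ := a
    rw [PySem.Dict.get?_mk_cons]
    by_cases h : (k == x) = true <;> simp [h, ih]

lemma pvPREFIXES_mk : pvPREFIXES = PySem.Dict.mk pvPrefixPairs := by decide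

-- the loop of A with an empty accumulator is first-match search
lemma pvDetectLoop_eq_find? (wl ll : String) (l : List (String × String)) :
    pvDetectLoop wl ll [] l = pvOut (l.find? (pvQA wl)) := by
  induction l with
  | nil => rfl
  | cons a t ih =>
    obtain ⟨p, m⟩ := a
    by_cases h : pvQA wl (p, m) = true
    · have h' : (PySem.Str.startswith wl p &&
          decide (PySem.Str.len wl > PySem.Str.len p + 2)) = true := h
      rw [pvDetectLoop, if_pos h', List.find?_cons, h]
      simp [pvOut]
    · have h' : (PySem.Str.startswith wl p &&
          decide (PySem.Str.len wl > PySem.Str.len p + 2)) = false := by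
        simpa [pvQA] using h
      have hf : pvQA wl (p, m) = false := eq_false_of_ne_true h
      rw [pvDetectLoop, if_neg (ne_true_of_eq_false h'), List.find?_cons, hf, ih]

-- A's test in take/length form
lemma pvQA_eq_pvQC (wl : String) (pm : String × String) : pvQA wl pm = pvQC wl pm := by
  rw [Bool.eq_iff_iff]
  simp only [pvQA, pvQC, Bool.and_eq_true, decide_eq_true_eq,
    PySem.Str.startswith_eq, PySem.Str.len_eq, PySem.Chars.startswith_iff,
    List.prefix_iff_eq_take]
  constructor
  · rintro ⟨h1, h2⟩
    exact ⟨h1.symm, by omega⟩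
  · rintro ⟨h1, h2⟩
    exact ⟨h1.symm, by omega⟩

-- one step of B's scan, through the length-L group of the table
lemma pvScanStep (wl : String) (L : Nat) (rest : List Int)
    (hn : L + 3 ≤ wl.toList.length) (hL : L < 7) :
    pvPrefixScan wl ((L : Int) :: rest)
      = match (pvG L).find? (pvQC wl) with
        | some (p, m) => [[("prefix", p ++ "-"), ("meaning", m)]]
        | none => pvPrefixScan wl rest := by
  have hcand : (PySem.Str.slice wl none (some (L : Int))).toList = wl.toList.take L := by
    rw [PySem.Str.toList_slice, PySem.Chars.slice_eq_listSlice, PySem.List.slice_to_natCast]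
  set cand := PySem.Str.slice wl none (some (L : Int)) with hc
  have hclen : cand.toList.length = L := by rw [hcand, List.length_take]; omega
  have hget : pvPREFIXES.get? cand = ((pvG L).find? (pvQC wl)).map (·.2) := by
    rw [pvPREFIXES_mk, pvGet?_eq_find?,
      pvFind?_filter pvPrefixPairs _ (fun pm => pm.1.toList.length == L)
        (by
          intro x _ hbeq
          have hx : x.1 = cand := by simpa using hbeq
          simp [hx, hclen]),
      pvFilter_eq L hL,
      pvFind?_congr_mem _ _ (pvQC wl)
        (by
          intro x hx
          have hxlen : x.1.toList.length = L := pvG_len L hL x hx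
          rw [Bool.eq_iff_iff]
          simp only [beq_iff_eq, pvQC, decide_eq_true_eq]
          constructor
          · intro h1
            rw [h1]
            exact ⟨by rw [hclen, hcand], by omega⟩
          · rintro ⟨h1, _⟩
            apply String.toList_inj.mp
            rw [← h1, hxlen, hcand])]
  simp only [pvPrefixScan, ← hc, hget]
  cases hfind : (pvG L).find? (pvQC wl) with
  | none => simp
  | some pm =>
    obtain ⟨p, m⟩ := pm
    have hp := List.find?_some hfind
    simp only [pvQC, decide_eq_true_eq] at hp
    have hpl : p.toList.length = L := pvG_len L hL _ (List.mem_of_find?_eq_some hfind)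
    have hpe : cand = p := by
      apply String.toList_inj.mp
      rw [hcand, ← hpl, hp.1]
    simp [hpe]

-- B's scan over m, m-1, …, 1 equals first-match search in the groups of length ≤ m
lemma pvChainEq (wl : String) : ∀ m : Nat, m < 7 → m + 3 ≤ wl.toList.length →
    pvOut ((pvT m).find? (pvQC wl)) = pvPrefixScan wl (PySem.List.pyRange (m : Int) 0 (-1)) := by
  intro m
  induction m with
  | zero =>
    intro _ _
    rw [PySem.List.pyRange_neg_one_eq_nil (by norm_num)]
    rfl
  | succ k ih =>
    intro h7 hn
    rw [PySem.List.pyRange_neg_one_cons (by positivity),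
      show ((k + 1 : Nat) : Int) - 1 = (k : Int) by push_cast; ring,
      pvScanStep wl (k + 1) _ hn h7,
      show pvT (k + 1) = pvG (k + 1) ++ pvT k from rfl,
      List.find?_append]
    cases hf : (pvG (k + 1)).find? (pvQC wl) with
    | some pm => obtain ⟨p, m⟩ := pm; simp [pvOut]
    | none =>
      simp only [Option.none_or]
      rw [← ih (by omega) (by omega)]

-- groups longer than the word allows never match
lemma pvDropAll (wl : String) : ∀ j m : Nat, m ≤ j → j ≤ 6 → wl.toList.length ≤ m + 3 →
    (pvT j).find? (pvQC wl) = (pvT m).find? (pvQC wl) := by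
  intro j
  induction j with
  | zero =>
    intro m hm _ _
    interval_cases m
    rfl
  | succ k ih =>
    intro m hm h6 hnn
    rcases Nat.eq_or_lt_of_le hm with rfl | hlt
    · rfl
    · rw [show pvT (k + 1) = pvG (k + 1) ++ pvT k from rfl, List.find?_append]
      have hnone : (pvG (k + 1)).find? (pvQC wl) = none := by
        rw [List.find?_eq_none]
        intro pm hpm hq
        have hlen := pvG_len (k + 1) (by omega) pm hpm
        simp only [pvQC, decide_eq_true_eq] at hq
        omega
      rw [hnone, Option.none_or]
      exact ih m (by omega) (by omega) hnn

-- ===== VERDICT (by name: the statement is the Claim_ definition above) =====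
theorem detect_prefixes_spec : Claim_equal_detect_prefixes := by
  intro word lemma_ _
  show detect_prefixes word lemma_ = detect_prefixes_alt word lemma_
  simp only [detect_prefixes, detect_prefixes_alt]
  rw [pvSorted_eq, pvDetectLoop_eq_find?,
    show pvQA (PySem.Str.lower word) = pvQC (PySem.Str.lower word) from
      funext (pvQA_eq_pvQC _),
    PySem.Str.len_eq]
  set wl := PySem.Str.lower word with hwl
  set n := wl.toList.length with hn
  by_cases h3 : n ≤ 3
  · have hA : (pvT 6).find? (pvQC wl) = none := by
      rw [List.find?_eq_none]
      intro pm hpm hq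
      have h1 : 1 ≤ pm.1.toList.length := by
        revert hpm
        have : ∀ pm ∈ pvT 6, 1 ≤ pm.1.toList.length := by decide
        exact this pm
      simp only [pvQC, decide_eq_true_eq] at hq
      omega
    rw [hA, PySem.List.pyRange_neg_one_eq_nil (by simp [pvMaxPrefixLen_eq]; omega)]
    rfl
  · rw [pvMaxPrefixLen_eq]
    by_cases h9 : n ≤ 9
    · rw [pvDropAll wl 6 (n - 3) (by omega) le_rfl (by omega),
        pvChainEq wl (n - 3) (by omega) (by omega),
        show ((n - 3 : Nat) : Int) = min ((n : Int) - 3) 6 by omega]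
    · rw [pvChainEq wl 6 (by omega) (by omega),
        show ((6 : Nat) : Int) = min ((n : Int) - 3) 6 by omega]
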